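-- pv_equiv track=rewrite | github.com/t0r1n88/Lachesis | cyberpsychology/yurieva_ssdkz.py | calc_value
-- ===== SOURCE A (Python) =====
-- def calc_value(row):
--     """
--     Функция для подсчета значения
--     :return: число
--     """
--     value_forward = 0  # результат
--     for idx, value in enumerate(row,1):
--         if idx != 4:
--             value_forward += value
--         else:
--             if value == 1:
--                 value_forward += 4
--             elif value == 2:
--                 value_forward += 3
--             elif value == 3:
--                 value_forward += 2
--             else:
--                 value_forward += 1
--
--     return value_forward
-- ===== SOURCE B (Python) =====
-- def calc_value(row):
--     total = sum(row[:3]) + sum(row[4:])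
--     if len(row) >= 4:
--         v = row[3]
--         if v == 1:
--             total += 4
--         elif v == 2:
--             total += 3
--         elif v == 3:
--             total += 2
--         else:
--             total += 1
--     return total
-- ===== Notes on version B (the rewrite author's own statement) =====
-- stated objective: simpler
-- what changed: Replaces the element-wise enumerate loop with a per-element index test by two plain slice summations that skip the fourth element, plus one guarded lookup transforming that element. (C-level builtin sum over slices instead of a Python-level branchy loop).
import Mathlib
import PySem

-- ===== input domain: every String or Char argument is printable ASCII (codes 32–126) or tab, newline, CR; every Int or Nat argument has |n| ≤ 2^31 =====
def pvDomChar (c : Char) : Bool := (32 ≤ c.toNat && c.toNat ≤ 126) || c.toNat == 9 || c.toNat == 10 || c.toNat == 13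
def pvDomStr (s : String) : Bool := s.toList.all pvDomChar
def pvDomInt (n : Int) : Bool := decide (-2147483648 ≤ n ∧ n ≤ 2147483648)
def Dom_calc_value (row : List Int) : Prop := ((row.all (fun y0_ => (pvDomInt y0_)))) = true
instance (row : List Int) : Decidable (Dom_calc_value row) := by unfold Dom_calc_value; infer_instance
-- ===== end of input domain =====

-- B replaces A's enumerate loop (branching at each index) by two slice sums that skip the fourth element plus one guarded transformed lookup; objective: simpler.


-- ===== PORT A =====
-- literal port: fold over row carrying (idx, value_forward), idx starting at 1
def calc_value (row : List Int) : Int :=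
  (row.foldl
    (fun (s : Int × Int) v =>
      (s.1 + 1,
        if s.1 ≠ 4 then s.2 + v
        else if v = 1 then s.2 + 4
        else if v = 2 then s.2 + 3
        else if v = 3 then s.2 + 2
        else s.2 + 1))
    (1, 0)).2

-- ===== PORT B =====
-- port of Source B: sum(row[:3]) + sum(row[4:]) plus a guarded transformed row[3]
def calc_value_alt (row : List Int) : Int :=
  let total := (row.take 3).sum + (row.drop 4).sum
  if 4 ≤ row.length then
    let v := row.getD 3 0
    if v = 1 then total + 4
    else if v = 2 then total + 3
    else if v = 3 then total + 2
    else total + 1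
  else total

-- ===== PRECONDITION & SPEC =====
def Spec_calc_value (row : List Int) (out : Int) : Prop := out = calc_value_alt row
instance (row : List Int) (out : Int) : Decidable (Spec_calc_value row out) := by unfold Spec_calc_value; infer_instance

-- ===== CLAIM (what is proved, stated in full; the proofs are below) =====
def Claim_equal_calc_value : Prop := ∀ (row : List Int), Dom_calc_value row → Spec_calc_value row (calc_value row)

-- ===== LEMMAS AND PROOFS =====
-- past index 4 the loop's branch never fires: the fold just adds each element
lemma calc_value_tail_fold (rest : List Int) (i acc : Int) (h : 5 ≤ i) :
    (rest.foldl
      (fun (s : Int × Int) v =>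
        (s.1 + 1,
          if s.1 ≠ 4 then s.2 + v
          else if v = 1 then s.2 + 4
          else if v = 2 then s.2 + 3
          else if v = 3 then s.2 + 2
          else s.2 + 1))
      (i, acc)).2 = acc + rest.sum := by
  induction rest generalizing i acc with
  | nil => simp
  | cons x xs ih =>
    simp only [List.foldl_cons, List.sum_cons]
    rw [if_pos (by omega : i ≠ 4)]
    rw [ih (i + 1) (acc + x) (by omega)]
    ring

-- ===== VERDICT (by name: the statement is the Claim_ definition above) =====
theorem calc_value_spec : Claim_equal_calc_value := by
  intro row _
  show calc_value row = calc_value_alt row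
  match row with
  | [] => rfl
  | [a] => simp [calc_value, calc_value_alt]
  | [a, b] => simp [calc_value, calc_value_alt]; try ring
  | [a, b, c] => simp [calc_value, calc_value_alt]; try ring
  | a :: b :: c :: d :: rest =>
    simp only [calc_value, calc_value_alt, List.foldl_cons]
    rw [if_pos (by norm_num : (1:Int) ≠ 4), if_pos (by norm_num : (1:Int) + 1 ≠ 4),
        if_pos (by norm_num : (1:Int) + 1 + 1 ≠ 4),
        if_neg (by norm_num : ¬ ((1:Int) + 1 + 1 + 1 ≠ 4))]
    rw [calc_value_tail_fold rest ((1:Int) + 1 + 1 + 1 + 1) _ (by norm_num)]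
    simp [List.take, List.drop, List.getD]
    split_ifs <;> try ring
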